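-- pv_equiv track=rewrite | github.com/needitem/ReSource | app/pipeline/module_classifier.py | _looks_catalog_identifier
-- ===== SOURCE A (Python) =====
-- def _looks_catalog_identifier(value: str) -> bool:
--     if not value or "|" in value or " " in value or "." in value or "/" in value:
--         return False
--     if len(value) < 4 or len(value) > 48:
--         return False
--     if not any(ch.isalpha() for ch in value):
--         return False
--     return "_" in value or any(ch.isupper() for ch in value[1:]) or any(ch.isdigit() for ch in value)
-- ===== SOURCE B (Python) =====
-- def _looks_catalog_identifier(value: str) -> bool:
--     # Single pass over the characters with boolean flags, instead of A's five
--     # separate substring/any scans; early exit on a forbidden character.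
--     n = len(value)
--     if n < 4 or n > 48:
--         return False
--     seen_alpha = False
--     seen_good = False  # underscore, digit, or uppercase at index >= 1
--     for i, ch in enumerate(value):
--         if ch in '| ./':
--             return False
--         if ch.isalpha():
--             seen_alpha = True
--         if ch == '_' or ch.isdigit() or (i > 0 and ch.isupper()):
--             seen_good = True
--     return seen_alpha and seen_good
-- ===== Notes on version B (the rewrite author's own statement) =====
-- stated objective: alternative
-- what changed: Replaces A's five separate substring-membership tests and three any() scans with one single pass over the characters maintaining seen_alpha/seen_good flags and an early exit on forbidden characters.
import Mathlib
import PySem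

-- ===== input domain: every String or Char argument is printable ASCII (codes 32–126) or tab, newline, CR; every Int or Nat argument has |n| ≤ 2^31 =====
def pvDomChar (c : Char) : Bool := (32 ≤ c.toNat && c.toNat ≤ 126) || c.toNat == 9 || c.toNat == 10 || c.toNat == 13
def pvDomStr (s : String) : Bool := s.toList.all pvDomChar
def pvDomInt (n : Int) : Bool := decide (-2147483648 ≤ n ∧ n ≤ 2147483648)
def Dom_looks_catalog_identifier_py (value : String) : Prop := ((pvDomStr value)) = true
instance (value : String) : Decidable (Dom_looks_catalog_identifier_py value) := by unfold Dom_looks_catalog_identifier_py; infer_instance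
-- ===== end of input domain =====

-- B replaces A's five substring tests and three any() scans by one pass with flags; objective: alternative.

-- ===== PORT A =====
def looks_catalog_identifier_py (value : String) : Bool :=
  if value.toList.isEmpty || PySem.Str.isIn "|" value || PySem.Str.isIn " " value
      || PySem.Str.isIn "." value || PySem.Str.isIn "/" value then false
  else if PySem.Str.len value < 4 || PySem.Str.len value > 48 then false
  else if !(value.toList.any PySem.Chars.isalpha) then false
  else PySem.Str.isIn "_" value
    || (PySem.List.slice value.toList (some 1) none).any PySem.Chars.isupper
    || value.toList.any PySem.Chars.isdigit

-- ===== PORT B =====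
-- the loop of Source B: state (first? seen_alpha seen_good), early return False on a forbidden char
-- ('ch in "| ./"' on a one-character ch is exactly this four-way disjunction)
def pvScanB : List Char → Bool → Bool → Bool → Bool
  | [], _, sa, sg => sa && sg
  | c :: cs, first, sa, sg =>
    if c == '|' || c == ' ' || c == '.' || c == '/' then false
    else pvScanB cs false (sa || PySem.Chars.isalpha c)
           (sg || c == '_' || PySem.Chars.isdigit c || (!first && PySem.Chars.isupper c))

def looks_catalog_identifier_py_alt (value : String) : Bool :=
  let n := PySem.Str.len value
  if n < 4 || n > 48 then false
  else pvScanB value.toList true false false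

-- ===== PRECONDITION & SPEC =====
def Spec_looks_catalog_identifier_py (value : String) (out : Bool) : Prop := out = looks_catalog_identifier_py_alt value
instance (value : String) (out : Bool) : Decidable (Spec_looks_catalog_identifier_py value out) := by unfold Spec_looks_catalog_identifier_py; infer_instance

-- ===== CLAIM (what is proved, stated in full; the proofs are below) =====
def Claim_equal_looks_catalog_identifier_py : Prop := ∀ (value : String), Dom_looks_catalog_identifier_py value → Spec_looks_catalog_identifier_py value (looks_catalog_identifier_py value)

-- ===== LEMMAS AND PROOFS =====

def pvOk (c : Char) : Bool := !(c == '|' || c == ' ' || c == '.' || c == '/')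
def pvGood (c : Char) : Bool := c == '_' || PySem.Chars.isdigit c || PySem.Chars.isupper c

lemma pvScanB_false (cs : List Char) (sa sg : Bool) :
    pvScanB cs false sa sg
      = (cs.all pvOk && (sa || cs.any PySem.Chars.isalpha) && (sg || cs.any pvGood)) := by
  induction cs generalizing sa sg with
  | nil => simp [pvScanB]
  | cons c cs ih =>
    simp only [pvScanB, List.all_cons, List.any_cons]
    by_cases hf : (c == '|' || c == ' ' || c == '.' || c == '/') = true
    · simp [hf, pvOk]
    · simp only [Bool.not_eq_true] at hf
      simp only [hf, ih, pvOk, Bool.not_false, Bool.true_and]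
      simp [pvGood, Bool.or_assoc]

lemma pvIsIn_singleton (c : Char) (s : List Char) :
    PySem.Chars.isIn [c] s = s.any (· == c) := by
  by_cases h : c ∈ s
  · obtain ⟨l1, l2, rfl⟩ := List.append_of_mem h
    rw [(PySem.Chars.isIn_iff_infix _ _).mpr ⟨l1, l2, by simp⟩]
    symm
    simp only [List.any_eq_true]
    exact ⟨c, h, by simp⟩
  · rw [(PySem.Chars.isIn_eq_false_iff _ _).mpr (fun hinf => h (hinf.sublist.subset (by simp)))]
    symm
    rw [List.any_eq_false]
    intro x hx
    by_cases hxc : x = c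
    · exact absurd hx (hxc ▸ h)
    · simp [hxc]

lemma pvAny_pvGood (cs : List Char) :
    cs.any pvGood = ((cs.any (· == '_') || cs.any PySem.Chars.isdigit) || cs.any PySem.Chars.isupper) := by
  induction cs with
  | nil => simp
  | cons c cs ih =>
    simp only [List.any_cons, ih, pvGood]
    simp [Bool.or_assoc, Bool.or_comm, Bool.or_left_comm]

lemma pvMain (s : List Char) :
    (if ((((s.isEmpty || s.any fun x => x == '|') || s.any fun x => x == ' ') || s.any fun x => x == '.') ||
            s.any fun x => x == '/') = true then false
     else if (decide ((s.length : Int) < 4) || decide ((s.length : Int) > 48)) = true then false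
     else if (!s.any PySem.Chars.isalpha) = true then false
     else (s.any fun x => x == '_') || s.tail.any PySem.Chars.isupper || s.any PySem.Chars.isdigit)
    = if (decide ((s.length : Int) < 4) || decide ((s.length : Int) > 48)) = true then false
      else pvScanB s true false false := by
  by_cases hlen : 4 ≤ s.length ∧ s.length ≤ 48
  · obtain ⟨c, cs, rfl⟩ : ∃ c cs, s = c :: cs := by
      cases s with
      | nil => exact absurd hlen.1 (by simp)
      | cons c cs => exact ⟨c, cs, rfl⟩
    have hlenB : ((decide (((c :: cs).length : Int) < 4) || decide (((c :: cs).length : Int) > 48))) = false := by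
      simp only [Bool.or_eq_false_iff, decide_eq_false_iff_not, not_lt, gt_iff_lt]
      constructor <;> [exact_mod_cast hlen.1; exact_mod_cast hlen.2]
    simp only [hlenB, Bool.false_eq_true, if_false, pvScanB]
    by_cases hf : (c == '|' || c == ' ' || c == '.' || c == '/') = true
    · have hA : (((((c :: cs).isEmpty || (c :: cs).any fun x => x == '|') || (c :: cs).any fun x => x == ' ')
          || (c :: cs).any fun x => x == '.') || (c :: cs).any fun x => x == '/') = true := by
        simp only [List.any_cons]
        simp only [Bool.or_eq_true] at hf ⊢
        tauto
      rw [if_pos hA, if_pos hf]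
    · have hf' : (c == '|' || c == ' ' || c == '.' || c == '/') = false := by
        simpa using hf
      rw [if_neg hf, pvScanB_false]
      by_cases hok : cs.all pvOk = true
      · have hok' : ∀ x ∈ cs, pvOk x = true := List.all_eq_true.mp hok
        have hA : (((((c :: cs).isEmpty || (c :: cs).any fun x => x == '|') || (c :: cs).any fun x => x == ' ')
            || (c :: cs).any fun x => x == '.') || (c :: cs).any fun x => x == '/') = false := by
          simp only [Bool.or_eq_false_iff] at hf'
          simp only [List.any_cons, List.isEmpty_cons, Bool.or_eq_false_iff, List.any_eq_false]
          refine ⟨⟨⟨⟨trivial, hf'.1.1.1, ?_⟩, hf'.1.1.2, ?_⟩, hf'.1.2, ?_⟩, hf'.2, ?_⟩ <;>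
            intro x hx <;> have hx' := hok' x hx <;> simp [pvOk] at hx' ⊢ <;> tauto
        rw [hA]
        simp only [Bool.false_eq_true, if_false, hok, Bool.true_and]
        simp only [Bool.false_or, Bool.not_true, Bool.false_and, Bool.or_false, List.any_cons,
          List.tail_cons]
        by_cases halpha : (PySem.Chars.isalpha c || cs.any PySem.Chars.isalpha) = true
        · rw [if_neg (by simp [halpha]), halpha, Bool.true_and, pvAny_pvGood]
          simp [Bool.or_assoc, Bool.or_comm, Bool.or_left_comm]
        · have h2 : (PySem.Chars.isalpha c || cs.any PySem.Chars.isalpha) = false := by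
            simpa using halpha
          simp [h2]
      · have hA : (((((c :: cs).isEmpty || (c :: cs).any fun x => x == '|') || (c :: cs).any fun x => x == ' ')
            || (c :: cs).any fun x => x == '.') || (c :: cs).any fun x => x == '/') = true := by
          simp only [List.all_eq_true, not_forall] at hok
          obtain ⟨x, hx, hbad⟩ := hok
          simp only [pvOk, Bool.not_eq_true, Bool.not_eq_false', Bool.or_eq_true] at hbad
          simp only [List.any_cons, Bool.or_eq_true, List.any_eq_true]
          rcases hbad with ((h | h) | h) | h
          · exact Or.inl (Or.inl (Or.inl (Or.inr (Or.inr ⟨x, hx, h⟩))))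
          · exact Or.inl (Or.inl (Or.inr (Or.inr ⟨x, hx, h⟩)))
          · exact Or.inl (Or.inr (Or.inr ⟨x, hx, h⟩))
          · exact Or.inr (Or.inr ⟨x, hx, h⟩)
        rw [if_pos hA]
        simp only [Bool.not_eq_true] at hok
        simp [hok]
  · have hlenB : ((decide ((s.length : Int) < 4) || decide ((s.length : Int) > 48))) = true := by
      simp only [Bool.or_eq_true, decide_eq_true_eq, gt_iff_lt]
      omega
    simp only [hlenB, if_true]
    split_ifs with h1' <;> rfl

-- ===== VERDICT (by name: the statement is the Claim_ definition above) =====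
theorem looks_catalog_identifier_py_spec : Claim_equal_looks_catalog_identifier_py := by
  intro value _
  unfold Spec_looks_catalog_identifier_py looks_catalog_identifier_py looks_catalog_identifier_py_alt
  have h1 : ("|".toList) = ['|'] := rfl
  have h2 : (" ".toList) = [' '] := rfl
  have h3 : (".".toList) = ['.'] := rfl
  have h4 : ("/".toList) = ['/'] := rfl
  have h5 : ("_".toList) = ['_'] := rfl
  simp only [PySem.Str.isIn_eq, PySem.Str.len_eq, h1, h2, h3, h4, h5, pvIsIn_singleton,
    PySem.List.slice_from_one]
  exact pvMain value.toList
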